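-- pv_equiv track=rewrite | github.com/cmsjade5000/ORION | scripts/run_inbox_packets.py | _packet_has_result
-- ===== SOURCE A (Python) =====
-- def _packet_has_result(packet_lines: list[str]) -> bool:
--     """
--     Consider a packet "done" only if there is a non-empty Result section.
--
--     ORION sometimes pre-creates an empty `Result:` placeholder; we treat that as pending.
--     """
--     start = None
--     for i, ln in enumerate(packet_lines):
--         if ln.strip() == "Result:":
--             start = i
--             break
--     if start is None:
--         return False
--     return any(ln.strip() for ln in packet_lines[start + 1 :])
-- ===== SOURCE B (Python) =====
-- def _packet_has_result(packet_lines: list[str]) -> bool: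
--     # Backward scan: a packet is "done" iff some "Result:" marker line is
--     # followed (anywhere later) by a non-empty line.  Since the marker line
--     # itself strips to non-empty text, this holds for SOME marker iff it
--     # holds for the FIRST marker, which is what A computes.
--     content_after = False
--     for ln in reversed(packet_lines):
--         if content_after and ln.strip() == "Result:":
--             return True
--         if ln.strip():
--             content_after = True
--     return False
-- ===== Notes on version B (the rewrite author's own statement) =====
-- stated objective: alternative
-- what changed: Traverses the lines BACK-TO-FRONT carrying 'non-empty content seen so far', answering true at a 'Result:' marker with content after it; correct because a non-empty line follows some marker iff one follows the first marker (the marker line itself is non-empty), replacing A's forward find-first-index-then-slice-then-any.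
import Mathlib
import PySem

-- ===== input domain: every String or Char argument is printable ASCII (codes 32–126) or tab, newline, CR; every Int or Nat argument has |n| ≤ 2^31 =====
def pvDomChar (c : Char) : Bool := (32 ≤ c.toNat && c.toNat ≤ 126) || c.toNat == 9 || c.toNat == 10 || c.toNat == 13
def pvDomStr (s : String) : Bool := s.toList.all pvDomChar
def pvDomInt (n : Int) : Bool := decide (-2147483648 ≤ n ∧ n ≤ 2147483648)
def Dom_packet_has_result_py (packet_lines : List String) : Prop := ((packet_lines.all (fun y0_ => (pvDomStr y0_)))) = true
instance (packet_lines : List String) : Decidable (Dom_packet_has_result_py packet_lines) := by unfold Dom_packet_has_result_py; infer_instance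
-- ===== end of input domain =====

-- B scans the lines back-to-front carrying 'content seen so far', instead of A's forward find-first-marker-then-slice-then-any (alternative decomposition; same cost).

-- ===== PORT A =====
-- the 'for i, ln in enumerate: if …: start = i; break' loop, returning the found index
def pvFindResultIdx : List String → Option Nat
  | [] => none
  | ln :: rest =>
    if PySem.Str.strip ln = "Result:" then some 0
    else (pvFindResultIdx rest).map (· + 1)

def packet_has_result_py (packet_lines : List String) : Bool :=
  match pvFindResultIdx packet_lines with
  | none => false
  | some start =>
    (PySem.List.slice packet_lines (some ((start : Int) + 1)) none).any
      (fun ln => PySem.Str.strip ln ≠ "")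

-- ===== PORT B =====
-- the backward pass over 'reversed(packet_lines)' carrying content_after
def pvBackScan : List String → Bool → Bool
  | [], _ => false
  | ln :: rest, contentAfter =>
    if contentAfter && (PySem.Str.strip ln = "Result:") then true
    else pvBackScan rest (contentAfter || (PySem.Str.strip ln ≠ ""))

def packet_has_result_py_alt (packet_lines : List String) : Bool :=
  pvBackScan packet_lines.reverse false

-- ===== PRECONDITION & SPEC =====
def Spec_packet_has_result_py (packet_lines : List String) (out : Bool) : Prop := out = packet_has_result_py_alt packet_lines
instance (packet_lines : List String) (out : Bool) : Decidable (Spec_packet_has_result_py packet_lines out) := by unfold Spec_packet_has_result_py; infer_instance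

-- ===== CLAIM (what is proved, stated in full; the proofs are below) =====
def Claim_equal_packet_has_result_py : Prop := ∀ (packet_lines : List String), Dom_packet_has_result_py packet_lines → Spec_packet_has_result_py packet_lines (packet_has_result_py packet_lines)

-- ===== LEMMAS AND PROOFS =====
-- appending one more line at the end of the backward scan
theorem pvBackScan_append (ys : List String) (ln : String) (c : Bool) :
    pvBackScan (ys ++ [ln]) c
      = (pvBackScan ys c
          || ((c || ys.any (fun x => PySem.Str.strip x ≠ ""))
              && (PySem.Str.strip ln = "Result:"))) := by
  induction ys generalizing c with
  | nil => simp [pvBackScan]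
  | cons y rest ih =>
    simp only [List.cons_append, pvBackScan, List.any_cons]
    by_cases h : c && (PySem.Str.strip y = "Result:")
    · simp [h]
    · simp only [if_neg h, ih]
      cases c <;> by_cases hy : PySem.Str.strip y = "" <;> simp_all

-- a successful backward scan (from flag false) implies some line is non-empty
theorem pvBackScan_imp_any (ys : List String) (c : Bool) :
    pvBackScan ys c = true → (c || ys.any (fun x => PySem.Str.strip x ≠ "")) = true := by
  induction ys generalizing c with
  | nil => simp [pvBackScan]
  | cons y rest ih =>
    simp only [pvBackScan, List.any_cons]
    by_cases h : (c && decide (PySem.Str.strip y = "Result:")) = true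
    · intro _; simp_all
    · rw [if_neg h]
      intro hrec
      have := ih _ hrec
      cases c <;> by_cases hy : PySem.Str.strip y = "" <;> simp_all

theorem pvSlice_succ (xs : List String) (k : Nat) :
    PySem.List.slice xs (some ((k : Int) + 1)) none = xs.drop (k + 1) := by
  have h := PySem.List.slice_from (a := (k : Int) + 1) (xs := xs) (by positivity)
  simpa using h

theorem pvMain (xs : List String) :
    packet_has_result_py xs = pvBackScan xs.reverse false := by
  induction xs with
  | nil => rfl
  | cons ln rest ih =>
    have hB : pvBackScan (ln :: rest).reverse false
        = (pvBackScan rest.reverse false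
            || (rest.reverse.any (fun x => PySem.Str.strip x ≠ "")
                && (PySem.Str.strip ln = "Result:"))) := by
      rw [List.reverse_cons, pvBackScan_append]; simp
    by_cases h : PySem.Str.strip ln = "Result:"
    · have hA : packet_has_result_py (ln :: rest)
          = rest.any (fun l => PySem.Str.strip l ≠ "") := by
        simp only [packet_has_result_py, pvFindResultIdx, if_pos h]
        rw [show ((0 : Nat) : Int) + 1 = ((0 : Nat) : Int) + 1 from rfl,
          pvSlice_succ (ln :: rest) 0]
        rfl
      rw [hA, hB]
      simp only [h, decide_true, Bool.and_true, List.any_reverse]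
      cases hbs : pvBackScan rest.reverse false
      · simp
      · have := pvBackScan_imp_any rest.reverse false hbs
        simp only [Bool.false_or, List.any_reverse] at this
        rw [this]; simp
    · have hAeq : packet_has_result_py (ln :: rest) = packet_has_result_py rest := by
        cases hf : pvFindResultIdx rest with
        | none =>
          simp [packet_has_result_py, pvFindResultIdx, if_neg h, hf]
        | some k =>
          simp only [packet_has_result_py, pvFindResultIdx, if_neg h, hf, Option.map_some]
          rw [show ((k + 1 : Nat) : Int) + 1 = (((k : Nat) + 1 : Nat) : Int) + 1 by push_cast; ring,
            pvSlice_succ (ln :: rest) (k + 1), pvSlice_succ rest k]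
          rfl
      rw [hAeq, ih, hB]
      simp [h]

-- ===== VERDICT (by name: the statement is the Claim_ definition above) =====
theorem packet_has_result_py_spec : Claim_equal_packet_has_result_py := by
  intro xs _
  unfold Spec_packet_has_result_py packet_has_result_py_alt
  exact pvMain xs
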